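-- pv_equiv track=rewrite | github.com/ArdaOzd/click_detection_ear_models | best_param_extract_heatmap.py | format_and_bold_parameter_names
-- ===== SOURCE A (Python) =====
-- def format_and_bold_parameter_names(algorithms):
--     formatted_names = []
--     bold_indices = []
--     for algo, params in algorithms.items():
--         if type(algo)== int:
--             bold_indices.append(len(formatted_names))  # Mark the algorithm name for bold
--             formatted_names.append('')  # Add the algorithm name without indentation
--             continue
--         else:
--             bold_indices.append(len(formatted_names))  # Mark the algorithm name for bold
--             formatted_names.append(f"{algo}")  # Add the algorithm name without indentation
--         for param in params:
--             if param == '':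
--                 continue
--             else:
--                 formatted_names.append(f"    {param}")  # Add the parameter names with indentation
--     return formatted_names, bold_indices
-- ===== SOURCE B (Python) =====
-- def format_and_bold_parameter_names(algorithms):
--     # Build one block per dict item, then compute bold indices as prefix sums
--     # of block lengths and flatten the blocks.
--     def block(algo, params):
--         if type(algo) == int:
--             return ['']
--         return [f"{algo}"] + [f"    {p}" for p in params if p != '']
--
--     blocks = [block(algo, params) for algo, params in algorithms.items()]
--     bold_indices = []
--     offset = 0
--     for b in blocks:
--         bold_indices.append(offset)
--         offset += len(b)
--     formatted_names = [name for b in blocks for name in b]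
--     return formatted_names, bold_indices
-- ===== Notes on version B (the rewrite author's own statement) =====
-- stated objective: alternative
-- what changed: Replaces the single interleaved append loop by a build-blocks pass (one block per item), a prefix-sum pass over block lengths for the bold indices, and a final flatten.
import Mathlib
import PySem

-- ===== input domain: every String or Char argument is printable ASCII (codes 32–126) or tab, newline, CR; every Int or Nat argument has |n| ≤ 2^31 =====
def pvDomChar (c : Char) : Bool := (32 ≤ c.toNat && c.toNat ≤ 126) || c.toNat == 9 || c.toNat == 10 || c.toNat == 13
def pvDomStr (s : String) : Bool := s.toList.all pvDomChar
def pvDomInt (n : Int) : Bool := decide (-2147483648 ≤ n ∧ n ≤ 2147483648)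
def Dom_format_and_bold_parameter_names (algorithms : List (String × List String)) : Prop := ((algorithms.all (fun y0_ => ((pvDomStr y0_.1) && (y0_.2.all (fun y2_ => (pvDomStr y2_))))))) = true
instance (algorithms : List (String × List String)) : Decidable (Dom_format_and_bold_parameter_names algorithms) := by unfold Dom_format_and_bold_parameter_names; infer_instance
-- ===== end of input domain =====

-- B rebuilds the same output via a blocks-then-prefix-sum decomposition instead of A's single interleaved append loop; objective: alternative decomposition, same cost.


-- ===== PORT A =====
-- Keys are Strings under the type convention, so Python's `type(algo) == int`
-- branch never fires; the loop appends the name, records its index, then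
-- appends the non-empty params indented.
def format_and_bold_parameter_names (algorithms : List (String × List String)) : List String × List Int :=
  algorithms.foldl
    (fun (st : List String × List Int) ap =>
      let bolds := st.2 ++ [(st.1.length : Int)]
      let names := st.1 ++ [ap.1]
      let names := ap.2.foldl (fun acc p => if p == "" then acc else acc ++ ["    " ++ p]) names
      (names, bolds))
    ([], [])

-- ===== PORT B =====
-- One block per item: the name followed by its indented non-empty params.
def pvBlock (ap : String × List String) : List String :=
  ap.1 :: (ap.2.filter (fun p => !(p == ""))).map (fun p => "    " ++ p)

def format_and_bold_parameter_names_alt (algorithms : List (String × List String)) : List String × List Int :=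
  let blocks := algorithms.map pvBlock
  let bolds := (blocks.foldl (fun (st : Int × List Int) b => (st.1 + b.length, st.2 ++ [st.1])) (0, [])).2
  (blocks.flatten, bolds)

-- ===== PRECONDITION & SPEC =====
def Spec_format_and_bold_parameter_names (algorithms : List (String × List String)) (out : List String × List Int) : Prop := out = format_and_bold_parameter_names_alt algorithms
instance (algorithms : List (String × List String)) (out : List String × List Int) : Decidable (Spec_format_and_bold_parameter_names algorithms out) := by unfold Spec_format_and_bold_parameter_names; infer_instance

-- ===== CLAIM (what is proved, stated in full; the proofs are below) =====
def Claim_equal_format_and_bold_parameter_names : Prop := ∀ (algorithms : List (String × List String)), Dom_format_and_bold_parameter_names algorithms → Spec_format_and_bold_parameter_names algorithms (format_and_bold_parameter_names algorithms)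

-- ===== LEMMAS AND PROOFS =====

-- offsets of the blocks, starting at `off`
def pvOffsets (off : Int) : List (List String) → List Int
  | [] => []
  | b :: bs => off :: pvOffsets (off + b.length) bs

theorem pv_inner (ps : List String) (acc : List String) :
    ps.foldl (fun acc p => if p == "" then acc else acc ++ ["    " ++ p]) acc
      = acc ++ (ps.filter (fun p => !(p == ""))).map (fun p => "    " ++ p) := by
  induction ps generalizing acc with
  | nil => simp
  | cons p ps ih =>
    simp only [List.foldl, List.filter]
    by_cases h : p == ""
    · simp only [h, Bool.not_true]
      exact ih acc
    · simp only [h, Bool.not_false]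
      rw [ih]
      simp

theorem pv_A_inv (l : List (String × List String)) (names : List String) (bolds : List Int) :
    l.foldl
      (fun (st : List String × List Int) ap =>
        let bolds := st.2 ++ [(st.1.length : Int)]
        let names := st.1 ++ [ap.1]
        let names := ap.2.foldl (fun acc p => if p == "" then acc else acc ++ ["    " ++ p]) names
        (names, bolds))
      (names, bolds)
      = (names ++ (l.map pvBlock).flatten,
         bolds ++ pvOffsets (names.length : Int) (l.map pvBlock)) := by
  induction l generalizing names bolds with
  | nil => simp [pvOffsets]
  | cons ap l ih =>
    simp only [List.foldl, List.map, pvOffsets]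
    rw [pv_inner, ih]
    have hlen : (((names ++ [ap.1] ++ (ap.2.filter (fun p => !(p == ""))).map (fun p => "    " ++ p)).length : Int))
        = (names.length : Int) + ((pvBlock ap).length : Int) := by
      simp [pvBlock]
    rw [hlen]
    simp [pvBlock]

theorem pv_B_inv (bs : List (List String)) (off : Int) (acc : List Int) :
    (bs.foldl (fun (st : Int × List Int) b => (st.1 + b.length, st.2 ++ [st.1])) (off, acc)).2
      = acc ++ pvOffsets off bs := by
  induction bs generalizing off acc with
  | nil => simp [pvOffsets]
  | cons b bs ih => simp [List.foldl, pvOffsets, ih]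

-- ===== VERDICT (by name: the statement is the Claim_ definition above) =====
theorem format_and_bold_parameter_names_spec : Claim_equal_format_and_bold_parameter_names := by
  intro algorithms _
  unfold Spec_format_and_bold_parameter_names
  unfold format_and_bold_parameter_names format_and_bold_parameter_names_alt
  rw [pv_A_inv]
  simp [pv_B_inv]
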